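-- pv_equiv track=rewrite | github.com/Dobatymo/genutility | genutility/iter.py | itersort
-- ===== SOURCE A (Python) =====
-- from heapq import heappop, heappush, heapreplace
-- from typing import (
--     Any,
--     Callable,
--     Collection,
--     Container,
--     Dict,
--     Generic,
--     Iterable,
--     Iterator,
--     List,
--     Optional,
--     Sequence,
--     Set,
--     TextIO,
--     Tuple,
--     Type,
--     TypeVar,
--     Union,
-- )
--
-- T = TypeVar("T")
--
-- def itersort(it: Iterable[T], buffer_size: int) -> Iterator[T]:
--
--     """Partially sorts iterator. Keeps at most `buffer_size` items in memory."""
--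
--     heap: List[T] = []
--     for item in it:
--         if len(heap) == buffer_size:
--             yield heapreplace(heap, item)
--         else:
--             heappush(heap, item)
--
--     while heap:
--         yield heappop(heap)
-- ===== SOURCE B (Python) =====
-- def itersort(it, buffer_size):
--     """Partially sorts iterator. Keeps at most `buffer_size` items in memory.
--
--     Plain-list variant: keep an unsorted buffer, yield its minimum (scan +
--     remove) when full, and sort the remainder once at the end.
--     """
--     buffer = []
--     for item in it:
--         if len(buffer) == buffer_size:
--             m = min(buffer)
--             yield m
--             buffer.remove(m)
--             buffer.append(item)
--         else:
--             buffer.append(item)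
--     buffer.sort()
--     yield from buffer
-- ===== Notes on version B (the rewrite author's own statement) =====
-- stated objective: simpler
-- what changed: Replaces the heap with a plain unsorted buffer: when full, yield min(buffer) found by a linear scan and remove it; at the end sort the remaining buffer once instead of popping a heap.
import Mathlib
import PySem

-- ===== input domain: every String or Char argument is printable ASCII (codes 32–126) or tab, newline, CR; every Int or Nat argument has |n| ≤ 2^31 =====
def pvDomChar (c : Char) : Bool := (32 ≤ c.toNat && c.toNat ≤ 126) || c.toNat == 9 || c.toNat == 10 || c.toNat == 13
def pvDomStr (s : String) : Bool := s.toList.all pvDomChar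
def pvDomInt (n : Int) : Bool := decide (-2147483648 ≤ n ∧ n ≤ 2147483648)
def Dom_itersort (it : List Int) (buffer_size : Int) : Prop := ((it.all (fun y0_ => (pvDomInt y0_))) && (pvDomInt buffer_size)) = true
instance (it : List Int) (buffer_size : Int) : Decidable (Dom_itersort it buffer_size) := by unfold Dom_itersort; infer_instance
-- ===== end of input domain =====

-- B replaces A's heap with a plain unsorted buffer (linear min-scan + one final sort): simpler, same output.
-- Both Pythons are generators; the equivalence is about the list of yielded values.


-- ===== PORT A =====
-- A calls the heapq library; the heap is ported as a self-contained skew min-heap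
-- (heappush = merge with a singleton; heappop / heapreplace = yield the root, merge the children).
-- On Int elements this yields exactly the values Python's array heap yields (the minimum each time).
inductive SkewHeap : Type
  | nil : SkewHeap
  | node : Int → SkewHeap → SkewHeap → SkewHeap
deriving DecidableEq, Repr

def SkewHeap.size : SkewHeap → Nat
  | .nil => 0
  | .node _ l r => l.size + r.size + 1

-- merge, structurally recursive on a fuel bound (fuel = total size; a totality guard only)
def SkewHeap.mergeF : Nat → SkewHeap → SkewHeap → SkewHeap
  | _, .nil, h => h
  | _, h, .nil => h
  | 0, h, _ => h                 -- never reached when size a + size b ≤ fuel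
  | fuel + 1, .node x l1 r1, .node y l2 r2 =>
    if x ≤ y then .node x (SkewHeap.mergeF fuel r1 (.node y l2 r2)) l1
    else .node y (SkewHeap.mergeF fuel r2 (.node x l1 r1)) l2

def SkewHeap.merge (a b : SkewHeap) : SkewHeap := SkewHeap.mergeF (a.size + b.size) a b

-- heappush h x
def SkewHeap.push (h : SkewHeap) (x : Int) : SkewHeap := SkewHeap.merge (.node x .nil .nil) h

-- the 'while heap: yield heappop(heap)' drain loop (fuel = heap size, a totality guard only)
def SkewHeap.drainF : Nat → SkewHeap → List Int
  | _, .nil => []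
  | 0, _ => []                   -- never reached when size h ≤ fuel
  | fuel + 1, .node v l r => v :: SkewHeap.drainF fuel (SkewHeap.merge l r)

def SkewHeap.drain (h : SkewHeap) : List Int := SkewHeap.drainF h.size h

-- the 'for item in it' loop, then the drain loop
def itersortGo (bs : Int) : List Int → SkewHeap → List Int
  | [], h => h.drain
  | x :: xs, h =>
    if (h.size : Int) = bs then
      match h with
      | .nil => []        -- heapreplace on an empty heap: Python raises IndexError (outside Pre_)
      | .node v l r => v :: itersortGo bs xs ((SkewHeap.merge l r).push x)
    else itersortGo bs xs (h.push x)

def itersort (it : List Int) (buffer_size : Int) : List Int :=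
  itersortGo buffer_size it .nil

-- ===== PORT B =====
-- Source B keeps an unsorted buffer: when full, yield min(buffer), remove it, append the item;
-- at the end buffer.sort() and yield the rest.
def itersortAltGo (bs : Int) : List Int → List Int → List Int
  | [], buf => PySem.List.sorted buf (fun y => y) false
  | x :: xs, buf =>
    if (buf.length : Int) = bs then
      match PySem.List.min? buf (fun y => y) with
      | none => []        -- min([]) : Python raises ValueError (outside Pre_)
      | some m => m :: itersortAltGo bs xs (((PySem.List.remove? buf m).getD buf) ++ [x])
    else itersortAltGo bs xs (buf ++ [x])

def itersort_alt (it : List Int) (buffer_size : Int) : List Int :=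
  itersortAltGo buffer_size it []

-- ===== PRECONDITION & SPEC =====
-- With buffer_size = 0 and a nonempty input, Python A raises IndexError (heapreplace on an
-- empty heap) and Python B raises ValueError (min of an empty buffer): those inputs are excluded.
def Pre_itersort (it : List Int) (buffer_size : Int) : Prop := it = [] ∨ buffer_size ≠ 0
instance (it : List Int) (buffer_size : Int) : Decidable (Pre_itersort it buffer_size) := by unfold Pre_itersort; infer_instance

def pvWitness_itersort : List Int × Int := ([3, 1, 2, 0, 5], 2)

def Spec_itersort (it : List Int) (buffer_size : Int) (out : List Int) : Prop := out = itersort_alt it buffer_size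
instance (it : List Int) (buffer_size : Int) (out : List Int) : Decidable (Spec_itersort it buffer_size out) := by unfold Spec_itersort; infer_instance

-- ===== CLAIM (what is proved, stated in full; the proofs are below) =====
def Claim_equal_itersort : Prop := ∀ (it : List Int) (buffer_size : Int), Dom_itersort it buffer_size → Pre_itersort it buffer_size → Spec_itersort it buffer_size (itersort it buffer_size)

-- ===== LEMMAS AND PROOFS =====

-- the heap's contents as a list (proof-side view of the heap)
def SkewHeap.toList : SkewHeap → List Int
  | .nil => []
  | .node v l r => v :: (l.toList ++ r.toList)

theorem SkewHeap.length_toList (h : SkewHeap) : h.toList.length = h.size := by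
  induction h with
  | nil => rfl
  | node v l r ihl ihr => simp [SkewHeap.toList, SkewHeap.size, ihl, ihr]

theorem SkewHeap.toList_mergeF : ∀ (fuel : Nat) (a b : SkewHeap), a.size + b.size ≤ fuel →
    (SkewHeap.mergeF fuel a b).toList.Perm (a.toList ++ b.toList) := by
  intro fuel
  induction fuel with
  | zero =>
      intro a b hf
      cases a with
      | nil => simp [SkewHeap.mergeF, SkewHeap.toList]
      | node x l r => simp [SkewHeap.size] at hf
  | succ fuel ih =>
      intro a b hf
      cases a with
      | nil => simp [SkewHeap.mergeF, SkewHeap.toList]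
      | node x l1 r1 =>
        cases b with
        | nil => simp [SkewHeap.mergeF, SkewHeap.toList]
        | node y l2 r2 =>
          have hrec1 : r1.size + (SkewHeap.node y l2 r2).size ≤ fuel := by
            simp [SkewHeap.size] at hf ⊢; omega
          have hrec2 : r2.size + (SkewHeap.node x l1 r1).size ≤ fuel := by
            simp [SkewHeap.size] at hf ⊢; omega
          by_cases hxy : x ≤ y
          · simp only [SkewHeap.mergeF, if_pos hxy, SkewHeap.toList]
            rw [List.perm_iff_count]
            intro a
            have hc := (ih _ _ hrec1).count_eq a
            simp [List.count_append, List.count_cons, SkewHeap.toList] at hc ⊢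
            omega
          · simp only [SkewHeap.mergeF, if_neg hxy, SkewHeap.toList]
            rw [List.perm_iff_count]
            intro a
            have hc := (ih _ _ hrec2).count_eq a
            simp [List.count_append, List.count_cons, SkewHeap.toList] at hc ⊢
            omega

theorem SkewHeap.toList_merge (a b : SkewHeap) :
    (SkewHeap.merge a b).toList.Perm (a.toList ++ b.toList) :=
  SkewHeap.toList_mergeF _ a b (le_refl _)

theorem SkewHeap.size_merge (a b : SkewHeap) : (SkewHeap.merge a b).size = a.size + b.size := by
  simpa [List.length_append, SkewHeap.length_toList] using (SkewHeap.toList_merge a b).length_eq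

def SkewHeap.IsHeap : SkewHeap → Prop
  | .nil => True
  | .node v l r => (∀ y ∈ l.toList, v ≤ y) ∧ (∀ y ∈ r.toList, v ≤ y) ∧ l.IsHeap ∧ r.IsHeap

theorem SkewHeap.mem_toList_merge {a : Int} {h1 h2 : SkewHeap} :
    a ∈ (SkewHeap.merge h1 h2).toList ↔ a ∈ h1.toList ∨ a ∈ h2.toList := by
  rw [(SkewHeap.toList_merge h1 h2).mem_iff, List.mem_append]

theorem SkewHeap.mem_toList_mergeF {a : Int} {fuel : Nat} {h1 h2 : SkewHeap}
    (hf : h1.size + h2.size ≤ fuel) :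
    a ∈ (SkewHeap.mergeF fuel h1 h2).toList ↔ a ∈ h1.toList ∨ a ∈ h2.toList := by
  rw [(SkewHeap.toList_mergeF fuel h1 h2 hf).mem_iff, List.mem_append]

theorem SkewHeap.isHeap_mergeF : ∀ (fuel : Nat) (a b : SkewHeap), a.size + b.size ≤ fuel →
    a.IsHeap → b.IsHeap → (SkewHeap.mergeF fuel a b).IsHeap := by
  intro fuel
  induction fuel with
  | zero =>
      intro a b hf ha hb
      cases a with
      | nil => simpa [SkewHeap.mergeF] using hb
      | node x l r => simp [SkewHeap.size] at hf
  | succ fuel ih =>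
      intro a b hf ha hb
      cases a with
      | nil => simpa [SkewHeap.mergeF] using hb
      | node x l1 r1 =>
        cases b with
        | nil => simpa [SkewHeap.mergeF] using ha
        | node y l2 r2 =>
          have hrec1 : r1.size + (SkewHeap.node y l2 r2).size ≤ fuel := by
            simp [SkewHeap.size] at hf ⊢; omega
          have hrec2 : r2.size + (SkewHeap.node x l1 r1).size ≤ fuel := by
            simp [SkewHeap.size] at hf ⊢; omega
          obtain ⟨hal, har, hhl, hhr⟩ := ha
          obtain ⟨hbl, hbr, hbhl, hbhr⟩ := hb
          by_cases hxy : x ≤ y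
          · simp only [SkewHeap.mergeF, if_pos hxy]
            refine ⟨?_, hal, ih _ _ hrec1 hhr ⟨hbl, hbr, hbhl, hbhr⟩, hhl⟩
            intro z hz
            rcases (SkewHeap.mem_toList_mergeF hrec1).1 hz with hz | hz
            · exact har z hz
            · simp only [SkewHeap.toList, List.mem_cons, List.mem_append] at hz
              rcases hz with rfl | hz | hz
              · exact hxy
              · exact le_trans hxy (hbl z hz)
              · exact le_trans hxy (hbr z hz)
          · simp only [SkewHeap.mergeF, if_neg hxy]
            refine ⟨?_, hbl, ih _ _ hrec2 hbhr ⟨hal, har, hhl, hhr⟩, hbhl⟩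
            intro z hz
            rcases (SkewHeap.mem_toList_mergeF hrec2).1 hz with hz | hz
            · exact hbr z hz
            · simp only [SkewHeap.toList, List.mem_cons, List.mem_append] at hz
              rcases hz with rfl | hz | hz
              · omega
              · exact le_trans (by omega) (hal z hz)
              · exact le_trans (by omega) (har z hz)

theorem SkewHeap.isHeap_merge {a b : SkewHeap} (ha : a.IsHeap) (hb : b.IsHeap) :
    (SkewHeap.merge a b).IsHeap :=
  SkewHeap.isHeap_mergeF _ a b (le_refl _) ha hb

theorem SkewHeap.isHeap_push {h : SkewHeap} (hh : h.IsHeap) (x : Int) : (h.push x).IsHeap := by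
  exact SkewHeap.isHeap_merge (by simp [SkewHeap.IsHeap, SkewHeap.toList]) hh

theorem SkewHeap.toList_push (h : SkewHeap) (x : Int) : (h.push x).toList.Perm (x :: h.toList) := by
  simpa [SkewHeap.toList] using SkewHeap.toList_merge (.node x .nil .nil) h

theorem SkewHeap.drainF_perm : ∀ (fuel : Nat) (h : SkewHeap), h.size ≤ fuel →
    (SkewHeap.drainF fuel h).Perm h.toList := by
  intro fuel
  induction fuel with
  | zero =>
      intro h hf
      cases h with
      | nil => simp [SkewHeap.drainF, SkewHeap.toList]
      | node v l r => simp [SkewHeap.size] at hf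
  | succ fuel ih =>
      intro h hf
      cases h with
      | nil => simp [SkewHeap.drainF, SkewHeap.toList]
      | node v l r =>
        have hrec : (SkewHeap.merge l r).size ≤ fuel := by
          rw [SkewHeap.size_merge]
          simp [SkewHeap.size] at hf
          omega
        simp only [SkewHeap.drainF, SkewHeap.toList]
        exact ((ih _ hrec).trans (SkewHeap.toList_merge l r)).cons v

theorem SkewHeap.drain_perm (h : SkewHeap) : h.drain.Perm h.toList :=
  SkewHeap.drainF_perm _ h (le_refl _)

theorem SkewHeap.drainF_pairwise : ∀ (fuel : Nat) (h : SkewHeap), h.size ≤ fuel →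
    h.IsHeap → (SkewHeap.drainF fuel h).Pairwise (· ≤ ·) := by
  intro fuel
  induction fuel with
  | zero =>
      intro h hf _
      cases h with
      | nil => simp [SkewHeap.drainF]
      | node v l r => simp [SkewHeap.size] at hf
  | succ fuel ih =>
      intro h hf hh
      cases h with
      | nil => simp [SkewHeap.drainF]
      | node v l r =>
        obtain ⟨hl, hr, hhl, hhr⟩ := hh
        have hrec : (SkewHeap.merge l r).size ≤ fuel := by
          rw [SkewHeap.size_merge]
          simp [SkewHeap.size] at hf
          omega
        simp only [SkewHeap.drainF]
        refine List.pairwise_cons.2 ⟨?_, ih _ hrec (SkewHeap.isHeap_merge hhl hhr)⟩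
        intro z hz
        have hz' := (SkewHeap.drainF_perm fuel _ hrec).mem_iff.1 hz
        rcases SkewHeap.mem_toList_merge.1 hz' with hz' | hz'
        · exact hl z hz'
        · exact hr z hz'

theorem SkewHeap.drain_pairwise (h : SkewHeap) : h.IsHeap → h.drain.Pairwise (· ≤ ·) :=
  SkewHeap.drainF_pairwise _ h (le_refl _)

-- main loop invariant: the heap's multiset equals the buffer's multiset
theorem go_eq (xs : List Int) : ∀ (h : SkewHeap) (buf : List Int) (bs : Int),
    h.IsHeap → h.toList.Perm buf → itersortGo bs xs h = itersortAltGo bs xs buf := by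
  induction xs with
  | nil =>
      intro h buf bs hh hp
      simp only [itersortGo, itersortAltGo]
      exact (PySem.List.sorted_id_eq_of_perm_of_pairwise _ _ ((SkewHeap.drain_perm h).trans hp)
        (SkewHeap.drain_pairwise h hh)).symm
  | cons x xs ih =>
      intro h buf bs hh hp
      have hlen : (buf.length : Int) = (h.size : Int) := by
        rw [hp.length_eq.symm, SkewHeap.length_toList]
      simp only [itersortGo, itersortAltGo, hlen]
      by_cases hc : (h.size : Int) = bs
      · simp only [hc, if_true]
        cases h with
        | nil =>
            have hbuf : buf = [] := (hp.symm).eq_nil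
            subst hbuf
            simp [PySem.List.min?]
        | node v l r =>
            have hne : buf ≠ [] := by
              intro hb
              subst hb
              exact absurd hp.eq_nil (by simp [SkewHeap.toList])
            obtain ⟨m, hm⟩ : ∃ m, PySem.List.min? buf (fun y => y) = some m := by
              cases hmm : PySem.List.min? buf (fun y => y) with
              | none => exact absurd ((PySem.List.min?_eq_none_iff _ _).1 hmm) hne
              | some m => exact ⟨m, rfl⟩
            obtain ⟨hl, hr, hhl, hhr⟩ := hh
            have hmv : m = v := by
              have hmmem : m ∈ buf := PySem.List.min?_mem hm
              have h1 : v ≤ m := by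
                have := hp.symm.mem_iff.1 hmmem
                simp only [SkewHeap.toList, List.mem_cons, List.mem_append] at this
                rcases this with rfl | hmem | hmem
                · exact le_refl m
                · exact hl m hmem
                · exact hr m hmem
              have h2 : m ≤ v := by
                have hv : v ∈ buf := hp.mem_iff.1 (by simp [SkewHeap.toList])
                exact PySem.List.min?_isMin hm v hv
              omega
            subst hmv
            rw [hm]
            have hmbuf : m ∈ buf := PySem.List.min?_mem hm
            show (m :: itersortGo bs xs ((SkewHeap.merge l r).push x)) =
                 (m :: itersortAltGo bs xs ((PySem.List.remove? buf m).getD buf ++ [x]))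
            rw [PySem.List.remove?_eq_some_erase buf m hmbuf]
            simp only [Option.getD_some]
            refine congrArg (m :: ·) (ih _ _ bs ?_ ?_)
            · exact SkewHeap.isHeap_push (SkewHeap.isHeap_merge hhl hhr) x
            · have h1 : ((SkewHeap.merge l r).push x).toList.Perm
                  (x :: (SkewHeap.merge l r).toList) := SkewHeap.toList_push _ x
              have h2 : (SkewHeap.merge l r).toList.Perm (l.toList ++ r.toList) :=
                SkewHeap.toList_merge l r
              have h3 : (buf.erase m).Perm (l.toList ++ r.toList) := by
                have := hp.symm.erase m
                simpa [SkewHeap.toList] using this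
              have h4 : (x :: (l.toList ++ r.toList)).Perm ((l.toList ++ r.toList) ++ [x]) :=
                @List.perm_append_comm _ [x] (l.toList ++ r.toList)
              exact h1.trans ((h2.cons x).trans (h4.trans (h3.symm.append_right [x])))
      · simp only [hc, if_false]
        refine ih _ _ bs (SkewHeap.isHeap_push hh x) ?_
        exact (SkewHeap.toList_push h x).trans ((hp.cons x).trans
          (@List.perm_append_comm _ [x] buf))

-- ===== VERDICT (by name: the statement is the Claim_ definition above) =====
theorem itersort_spec : Claim_equal_itersort := by
  intro it bs _ _
  unfold Spec_itersort itersort itersort_alt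
  exact go_eq it .nil [] bs trivial (by simp [SkewHeap.toList])
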